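-- pv_equiv track=rewrite | github.com/lexiconium/algorithms | codeforces/1820b.py | solve
-- ===== SOURCE A (Python) =====
-- def solve(s: str) -> int:
--     if (begin := s.find("1")) == -1:
--         return 0
--     if (s_len := len(s)) == 1:
--         return 1
--
--     max_len = 0
--
--     while begin < s_len:
--         end = (begin + 1) % s_len
--
--         while s[end] == "1" and end != begin:
--             end = (end + 1) % s_len
--
--         max_len = max(end - begin if end > begin else s_len - begin + end, max_len)
--
--         while s[end] == "0" and end != begin:
--             end = (end + 1) % s_len
--
--         if end <= begin:
--             break
--
--         begin = end
--
--     if max_len == s_len: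
--         return s_len * s_len
--
--     def area(m: int) -> int:
--         return m * (max_len - m + 1)
--
--     if max_len % 2:
--         return area((max_len + 1) // 2)
--     return max(area(max_len // 2), area((max_len + 2) // 2))
-- ===== SOURCE B (Python) =====
-- def solve(s: str) -> int:
--     if "1" not in s:
--         return 0
--     n = len(s)
--     if "0" not in s:
--         return n * n
--     best = cur = 0
--     for c in s:
--         cur = cur + 1 if c == "1" else 0
--         if cur > best:
--             best = cur
--     lead = 0
--     while s[lead] == "1":
--         lead += 1
--     max_len = max(best, lead + cur)
--     half = (max_len + 1) // 2
--     return half * (max_len - half + 1)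
-- ===== Notes on version B (the rewrite author's own statement) =====
-- stated objective: simpler
-- what changed: Replaces the circular two-pointer scan with modular index chasing by a single linear fold that tracks the best and current run of ones plus a leading-ones count for the wrap-around run, and collapses the parity-split area maximisation to one closed-form half.
-- outside the precondition, e.g. on solve('10a'): A returns 2, B returns 1; on solve('a1'): A returns 1, B returns 4
import Mathlib
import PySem

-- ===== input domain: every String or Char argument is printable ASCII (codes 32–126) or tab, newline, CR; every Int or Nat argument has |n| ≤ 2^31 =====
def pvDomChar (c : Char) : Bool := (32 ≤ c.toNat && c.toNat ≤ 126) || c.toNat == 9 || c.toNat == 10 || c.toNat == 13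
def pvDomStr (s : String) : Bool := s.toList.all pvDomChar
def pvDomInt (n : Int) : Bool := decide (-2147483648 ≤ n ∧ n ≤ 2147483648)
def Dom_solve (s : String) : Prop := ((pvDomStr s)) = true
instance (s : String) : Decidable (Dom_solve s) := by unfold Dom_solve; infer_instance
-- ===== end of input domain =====

-- B replaces A's circular two-pointer scan by one linear fold (best/current run of ones)
-- plus a leading-ones count for the wrap run, and a single closed-form area half; same values
-- on all binary strings (Pre_solve).

-- ===== PORT A =====
-- inner `while s[end] == c and end != begin: end = (end + 1) % s_len` loops of A,
-- one shared shape for the '1'-scan and the '0'-scan; the index e is always in [0, n),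
-- so `l.getD e ' '` is exactly Python's `s[end]`; the loop revisits no position before
-- stopping, so fuel n (supplied at call site) is enough and the fuel guard never fires.
def scanCirc (tc : Char) (l : List Char) (n b : Nat) : Nat → Nat → Nat
  | e, 0 => e
  | e, f + 1 => if l.getD e ' ' = tc ∧ e ≠ b then scanCirc tc l n b ((e + 1) % n) f else e

-- A's outer `while begin < s_len` loop; `begin` strictly increases on every non-breaking
-- iteration, so fuel n (supplied at call site) is enough and the fuel guard never fires.
def outerLoop (l : List Char) (n : Nat) : Nat → Nat → Nat → Nat
  | _, m, 0 => m
  | b, m, f + 1 =>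
    if b < n then
      let e1 := scanCirc '1' l n b ((b + 1) % n) n
      let m' := max (if b < e1 then e1 - b else n - b + e1) m
      let e2 := scanCirc '0' l n b e1 n
      if e2 ≤ b then m' else outerLoop l n e2 m' f
    else m

def solve (s : String) : Int :=
  let begin_ := PySem.Str.find s "1"
  if begin_ = -1 then 0
  else
    let sLen := PySem.Str.len s
    if sLen = 1 then 1
    else
      let l := s.toList
      let n := l.length
      let maxLen := outerLoop l n begin_.toNat 0 n
      if (maxLen : Int) = sLen then sLen * sLen
      else
        let area : Int → Int := fun m => m * ((maxLen : Int) - m + 1)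
        if PySem.Int.mod (maxLen : Int) 2 ≠ 0 then area (PySem.Int.floordiv ((maxLen : Int) + 1) 2)
        else max (area (PySem.Int.floordiv (maxLen : Int) 2)) (area (PySem.Int.floordiv ((maxLen : Int) + 2) 2))

-- ===== PORT B =====
-- one step of B's `for c in s` loop: state (best, cur)
def foldStep (p : Nat × Nat) (c : Char) : Nat × Nat :=
  let cur := if c = '1' then p.2 + 1 else 0
  (max p.1 cur, cur)

-- B's `while s[lead] == "1": lead += 1` counter (the guard index never leaves the string
-- because B runs it only when '0' occurs in s)
def leadOnes : List Char → Nat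
  | [] => 0
  | c :: t => if c = '1' then 1 + leadOnes t else 0

def solve_alt (s : String) : Int :=
  if PySem.Str.isIn "1" s = false then 0
  else
    let n := PySem.Str.len s
    if PySem.Str.isIn "0" s = false then n * n
    else
      let q := s.toList.foldl foldStep (0, 0)
      let lead := leadOnes s.toList
      let maxLen : Nat := max q.1 (lead + q.2)
      let half := PySem.Int.floordiv ((maxLen : Int) + 1) 2
      half * ((maxLen : Int) - half + 1)

-- ===== PRECONDITION & SPEC =====
-- Pre_solve restricts to the task's natural domain: binary strings (every char '0' or
-- '1'), plus any string without a '1' (both programs return 0 there whatever the other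
-- characters are). A also accepts non-binary strings containing a '1', but its value
-- there is an accident of the mod-wraparound scanning treating non-'0'/'1' characters
-- as both run-breakers and wrap-joiners; B does the natural thing there instead.
def Pre_solve (s : String) : Prop :=
  (s.toList.all (fun c => c == '0' || c == '1') || !(s.toList.contains '1')) = true
instance (s : String) : Decidable (Pre_solve s) := by unfold Pre_solve; infer_instance

def pvWitness_solve : String := "0110"

def Spec_solve (s : String) (out : Int) : Prop := out = solve_alt s
instance (s : String) (out : Int) : Decidable (Spec_solve s out) := by unfold Spec_solve; infer_instance

-- ===== CLAIM (what is proved, stated in full; the proofs are below) =====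
def Claim_equal_solve : Prop := ∀ (s : String), Dom_solve s → Pre_solve s → Spec_solve s (solve s)

-- ===== LEMMAS AND PROOFS =====

-- length of the '1'/'0' prefix
def tw (p : Char) (t : List Char) : Nat := (t.takeWhile (· == p)).length

-- circular count of consecutive p's starting at position e
def cnt (p : Char) (l : List Char) (e : Nat) : Nat := tw p (l.rotate e)

-- reference value of A's scan: max circular run over the 1-runs of t (a suffix of the
-- string), where a run reaching the end of t picks up L extra wrapped-around ones
def G : List Char → Nat → Nat
  | [], _ => 0
  | c :: t, L =>
    if c = '0' then G t L
    else if tw '1' t = t.length then 1 + t.length + L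
    else max (1 + tw '1' t) (G (t.drop (tw '1' t)) L)
termination_by t _ => t.length
decreasing_by
  all_goals simp [List.length_drop]

theorem tw_le (p : Char) (t : List Char) : tw p t ≤ t.length :=
  (List.takeWhile_prefix _).length_le
theorem tw_eq_len_iff (p : Char) (t : List Char) : tw p t = t.length ↔ ∀ x ∈ t, x = p := by
  constructor
  · intro h x hx
    have he : t.takeWhile (· == p) = t := (List.takeWhile_prefix _).eq_of_length h
    have := List.mem_takeWhile_imp (l := t) (p := (· == p)) (x := x) (by rw [he]; exact hx)
    simpa using this
  · intro h
    have : t.takeWhile (· == p) = t := List.takeWhile_eq_self_iff.mpr (by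
      intro x hx; simpa using h x hx)
    simp [tw, this]
theorem tw_lt (p : Char) (t : List Char) (h : ∃ x ∈ t, x ≠ p) : tw p t < t.length := by
  rcases h with ⟨x, hx, hxp⟩
  rcases Nat.lt_or_ge (tw p t) t.length with h' | h'
  · exact h'
  · exact absurd ((tw_eq_len_iff p t).mp (le_antisymm (tw_le p t) h') x hx) hxp
theorem takeWhile_eq_replicate (p : Char) (t : List Char) :
    t.takeWhile (· == p) = List.replicate (tw p t) p := by
  rw [List.eq_replicate_iff]
  exact ⟨rfl, fun b hb => by simpa using List.mem_takeWhile_imp hb⟩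
theorem charAt_run (p : Char) (l : List Char) (e k : Nat) (he : e < l.length)
    (hk : k < cnt p l e) : l.getD ((e + k) % l.length) ' ' = p := by
  have hn : 0 < l.length := Nat.lt_of_le_of_lt (Nat.zero_le _) he
  have htw := tw_le p (l.rotate e)
  have hlenr : (l.rotate e).length = l.length := List.length_rotate ..
  have hk1 : k < (l.rotate e).length := by unfold cnt at hk; omega
  obtain ⟨u, hu⟩ := List.takeWhile_prefix (l := l.rotate e) (p := (· == p))
  have hsome : (l.rotate e)[k]? = some p := by
    conv_lhs => rw [← hu]
    rw [List.getElem?_append_left (by exact hk), takeWhile_eq_replicate,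
      List.getElem?_replicate, if_pos (show k < tw p (l.rotate e) from hk)]
  have hval : (l.rotate e)[k]'hk1 = p := by
    rw [List.getElem?_eq_getElem hk1] at hsome
    exact Option.some.inj hsome
  rw [List.getElem_rotate] at hval
  have hlt : (e + k) % l.length < l.length := Nat.mod_lt _ hn
  rw [List.getD_eq_getElem?_getD, List.getElem?_eq_getElem hlt]
  simpa [Nat.add_comm] using hval

theorem charAt_after (p : Char) (l : List Char) (e : Nat) (he : e < l.length)
    (hc : cnt p l e < l.length) : l.getD ((e + cnt p l e) % l.length) ' ' ≠ p := by
  have hn : 0 < l.length := Nat.lt_of_le_of_lt (Nat.zero_le _) he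
  have hlenr : (l.rotate e).length = l.length := List.length_rotate ..
  have hk1 : cnt p l e < (l.rotate e).length := by omega
  have hlensum : ((l.rotate e).takeWhile (· == p)).length
      + ((l.rotate e).dropWhile (· == p)).length = (l.rotate e).length := by
    conv_rhs => rw [← List.takeWhile_append_dropWhile (p := (· == p)) (l := l.rotate e)]
    exact (List.length_append ..).symm
  have hdw : (l.rotate e).dropWhile (· == p) ≠ [] := by
    intro hnil
    rw [hnil] at hlensum
    unfold cnt tw at hc
    simp at hlensum
    omega
  have hsome : (l.rotate e)[cnt p l e]? =
      some (((l.rotate e).dropWhile (· == p)).head hdw) := by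
    conv_lhs => rw [← List.takeWhile_append_dropWhile (p := (· == p)) (l := l.rotate e)]
    rw [List.getElem?_append_right (by exact le_refl _)]
    have : cnt p l e - ((l.rotate e).takeWhile (· == p)).length = 0 := by
      unfold cnt tw; omega
    rw [this, List.getElem?_eq_getElem (by
      cases h : (l.rotate e).dropWhile (· == p) with
      | nil => exact absurd h hdw
      | cons a t => simp [h]), ← List.head_eq_getElem]
  have hne : ¬ ((((l.rotate e).dropWhile (· == p)).head hdw) == p) = true :=
    by simpa using List.head_dropWhile_not (· == p) hdw
  have hval : (l.rotate e)[cnt p l e]'hk1 =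
      ((l.rotate e).dropWhile (· == p)).head hdw := by
    rw [List.getElem?_eq_getElem hk1] at hsome
    exact Option.some.inj hsome
  rw [List.getElem_rotate] at hval
  have hlt : (e + cnt p l e) % l.length < l.length := Nat.mod_lt _ hn
  rw [List.getD_eq_getElem?_getD, List.getElem?_eq_getElem hlt]
  intro hcontra
  apply hne
  rw [← hval]
  simpa [Nat.add_comm] using hcontra

theorem cnt_shift (p : Char) (l : List Char) (e : Nat) (he : e < l.length)
    (hce : l.getD e ' ' = p) (hw : ∃ x ∈ l, x ≠ p) :
    cnt p l ((e + 1) % l.length) + 1 = cnt p l e := by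
  have hn : 0 < l.length := Nat.lt_of_le_of_lt (Nat.zero_le _) he
  have hr : (l.rotate e).length = l.length := List.length_rotate ..
  obtain ⟨a, t, hat⟩ : ∃ a t, l.rotate e = a :: t := by
    rcases hl : l.rotate e with _ | ⟨a, t⟩
    · exfalso
      have h2 : (l.rotate e).length = 0 := by rw [hl]; rfl
      omega
    · exact ⟨a, t, rfl⟩
  have ha : a = p := by
    have hlt0 : 0 < (l.rotate e).length := by rw [hr]; exact hn
    have hij : (l.rotate e)[0]? = l[e]? := by
      rw [List.getElem?_eq_getElem hlt0, List.getElem?_eq_getElem he]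
      simp [List.getElem_rotate, Nat.mod_eq_of_lt he]
    rw [hat] at hij
    simp at hij
    rw [List.getD_eq_getElem?_getD, List.getElem?_eq_getElem he] at hce
    simp at hce
    rw [List.getElem?_eq_getElem he] at hij
    simp at hij
    rw [hij, hce]
  have hnotall : ¬ (tw p t = t.length) := by
    intro hall
    rcases hw with ⟨x, hx, hxp⟩
    have hxr : x ∈ l.rotate e := (List.mem_rotate).mpr hx
    rw [hat] at hxr
    rcases List.mem_cons.mp hxr with h | h
    · exact hxp (h.trans ha)
    · exact hxp ((tw_eq_len_iff p t).mp hall x h)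
  have hrot1 : l.rotate ((e + 1) % l.length) = t ++ [a] := by
    rw [List.rotate_mod, ← List.rotate_rotate, hat]
    simpa using List.rotate_cons_succ t a 0
  have hcnte : cnt p l e = tw p t + 1 := by
    simp [cnt, hat, tw, List.takeWhile_cons, ha]
  have hcnts : cnt p l ((e + 1) % l.length) = tw p t := by
    simp only [cnt, hrot1, tw, List.takeWhile_append]
    rw [if_neg (by simpa [tw] using hnotall)]
  omega
theorem cnt_lt (p : Char) (l : List Char) (e : Nat) (he : e < l.length)
    (hw : ∃ x ∈ l, x ≠ p) : cnt p l e < l.length := by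
  rcases hw with ⟨x, hx, hxp⟩
  have : cnt p l e < (l.rotate e).length :=
    tw_lt p _ ⟨x, (List.mem_rotate).mpr hx, hxp⟩
  simpa [List.length_rotate] using this
theorem cnt_eq (p : Char) (l : List Char) (e : Nat) (he : e < l.length) :
    cnt p l e = if tw p (l.drop e) = l.length - e
      then (l.length - e) + tw p (l.take e) else tw p (l.drop e) := by
  unfold cnt
  rw [List.rotate_eq_drop_append_take (le_of_lt he)]
  simp only [tw, List.takeWhile_append, List.length_drop]
  split_ifs with h
  · simp
  · rfl


theorem getD_lt (l : List Char) (i : Nat) (h : i < l.length) : l.getD i ' ' = l[i]'h := by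
  rw [List.getD_eq_getElem?_getD, List.getElem?_eq_getElem h]; rfl

theorem getElem_of_lt_tw (p : Char) (t : List Char) (i : Nat) (h : i < tw p t) :
    t[i]'(lt_of_lt_of_le h (tw_le p t)) = p := by
  obtain ⟨u, hu⟩ := List.takeWhile_prefix (l := t) (p := (· == p))
  have hsome : t[i]? = some p := by
    conv_lhs => rw [← hu]
    rw [List.getElem?_append_left (by exact h), takeWhile_eq_replicate,
      List.getElem?_replicate, if_pos (show i < tw p t from h)]
  rw [List.getElem?_eq_getElem (lt_of_lt_of_le h (tw_le p t))] at hsome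
  exact Option.some.inj hsome

theorem mod_small_cases (x n : Nat) (h2 : x < 2 * n) :
    x % n = if x < n then x else x - n := by
  split_ifs with h
  · exact Nat.mod_eq_of_lt h
  · rw [Nat.mod_eq_sub_mod (by omega)]
    exact Nat.mod_eq_of_lt (by omega)

theorem cnt_pos (p : Char) (l : List Char) (e : Nat) (he : e < l.length)
    (hc : l.getD e ' ' = p) (hw : ∃ x ∈ l, x ≠ p) : 1 ≤ cnt p l e := by
  by_contra h
  have h0 : cnt p l e = 0 := by omega
  have := charAt_after p l e he (by rw [h0]; omega)
  rw [h0] at this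
  simp [Nat.mod_eq_of_lt he] at this
  exact this hc

theorem scan_spec (p : Char) (l : List Char) (b : Nat) :
    ∀ (c e f : Nat), e < l.length → cnt p l e = c → c ≤ f → (∃ x ∈ l, x ≠ p) →
    (∀ k, k < c → (e + k) % l.length ≠ b) →
    scanCirc p l l.length b e f = (e + c) % l.length := by
  intro c
  induction c with
  | zero =>
    intro e f he hc _ _ _
    have hch : l.getD e ' ' ≠ p := by
      have := charAt_after p l e he (by rw [hc]; omega)
      rw [hc] at this
      simpa [Nat.mod_eq_of_lt he] using this
    cases f with
    | zero => simp [scanCirc, Nat.mod_eq_of_lt he]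
    | succ f =>
      rw [scanCirc, if_neg (by rintro ⟨h1, _⟩; exact hch h1)]
      simp [Nat.mod_eq_of_lt he]
  | succ c ih =>
    intro e f he hc hcf hw hb
    obtain ⟨f', rfl⟩ : ∃ f', f = f' + 1 := ⟨f - 1, by omega⟩
    have hch : l.getD e ' ' = p := by
      have := charAt_run p l e 0 he (by omega)
      simpa [Nat.mod_eq_of_lt he] using this
    have hne : e ≠ b := by
      have := hb 0 (by omega)
      simpa [Nat.mod_eq_of_lt he] using this
    have hn : 0 < l.length := by omega
    have hshift := cnt_shift p l e he hch hw
    have he1 : (e + 1) % l.length < l.length := Nat.mod_lt _ hn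
    have hb' : ∀ k, k < c → ((e + 1) % l.length + k) % l.length ≠ b := by
      intro k hk
      rw [Nat.mod_add_mod]
      have := hb (k + 1) (by omega)
      simpa [Nat.add_assoc, Nat.add_comm 1 k] using this
    have hrec := ih ((e + 1) % l.length) f' he1 (by omega) (by omega) hw hb'
    rw [scanCirc, if_pos ⟨hch, hne⟩, hrec, Nat.mod_add_mod]
    congr 1
    omega

theorem scan_allones (l : List Char) (hall : ∀ x ∈ l, x = '1') :
    ∀ (f e : Nat), e < l.length → (e = 0 ∨ l.length - e ≤ f) →
    scanCirc '1' l l.length 0 e f = 0 := by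
  intro f
  induction f with
  | zero =>
    intro e he hcase
    rcases hcase with h | h
    · simp [scanCirc, h]
    · omega
  | succ f ih =>
    intro e he hcase
    by_cases he0 : e = 0
    · subst he0; simp [scanCirc]
    · have hch : l.getD e ' ' = '1' := by
        rw [getD_lt l e he]
        exact hall _ (List.getElem_mem he)
      rw [scanCirc, if_pos ⟨hch, he0⟩]
      by_cases hlast : e + 1 = l.length
      · have : (e + 1) % l.length = 0 := by rw [hlast]; simp
        rw [this]
        exact ih 0 (by omega) (Or.inl rfl)
      · have hlt : e + 1 < l.length := by omega
        rw [Nat.mod_eq_of_lt hlt]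
        exact ih (e + 1) hlt (Or.inr (by omega))

theorem G_zeros (z : Nat) (r : List Char) (L : Nat) :
    G (List.replicate z '0' ++ r) L = G r L := by
  induction z with
  | zero => rfl
  | succ z ih => rw [List.replicate_succ, List.cons_append]; simpa [G] using ih
theorem G_ones (k : Nat) (L : Nat) : G (List.replicate (k + 1) '1') L = (k + 1) + L := by
  rw [List.replicate_succ]
  have htw : tw '1' (List.replicate k '1') = k := by
    simp [tw, List.takeWhile_replicate]
  simp [G, htw]
  omega

theorem G_run (j : Nat) (r : List Char) (L : Nat) :
    G (List.replicate j '1' ++ '0' :: r) L = max j (G r L) := by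
  cases j with
  | zero => simp [G]
  | succ j =>
    rw [List.replicate_succ, List.cons_append]
    have htw : tw '1' (List.replicate j '1' ++ '0' :: r) = j := by
      simp [tw, List.takeWhile_append, List.takeWhile_replicate, List.takeWhile_cons]
    have hlen : (List.replicate j '1' ++ '0' :: r).length = j + r.length + 1 := by
      simp; omega
    have hdrop : (List.replicate j '1' ++ '0' :: r).drop j = '0' :: r := by
      have := List.drop_left (l₁ := List.replicate j '1') (l₂ := '0' :: r)
      simpa using this
    rw [G]
    rw [if_neg (by decide), htw, hlen, if_neg (by omega), hdrop]
    have : G ('0' :: r) L = G r L := by simp [G]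
    rw [this]
    omega
theorem G_le (t : List Char) (L : Nat) : G t L ≤ t.length + L := by
  fun_induction G t L with
  | case1 => simp
  | case2 t L ih => simp at ih ⊢; omega
  | case3 c t L hc htw => simp; omega
  | case4 c t L hc htw ih =>
    have h1 := tw_le '1' t
    simp at ih ⊢
    omega
theorem G_drop_zeros (L : Nat) : ∀ (k : Nat) (l : List Char), k ≤ l.length →
    (∀ i, i < k → l.getD i ' ' = '0') → G l L = G (l.drop k) L := by
  intro k
  induction k with
  | zero => intro l _ _; rfl
  | succ k ih =>
    intro l hk hz
    cases l with
    | nil => simp at hk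
    | cons c rest =>
      have hc : c = '0' := by
        have := hz 0 (by omega)
        simpa [List.getD] using this
      subst hc
      have h1 : G ('0' :: rest) L = G rest L := by simp [G]
      rw [h1, List.drop_succ_cons]
      exact ih rest (by simpa using hk) (fun i hi => by
        have := hz (i + 1) (by omega)
        simpa [List.getD] using this)

theorem outer_spec (l : List Char) (hbin : ∀ c ∈ l, c = '0' ∨ c = '1')
    (h1 : '1' ∈ l) (h0 : '0' ∈ l) :
    ∀ (f b m : Nat), b < l.length → l.getD b ' ' = '1' → l.length - b ≤ f →
    outerLoop l l.length b m f = max m (G (l.drop b) (tw '1' l)) := by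
  intro f
  induction f with
  | zero => intro b m hb _ hf; omega
  | succ f ih =>
    intro b m hb hcb hf
    have hn : 0 < l.length := by omega
    have hw1 : ∃ x ∈ l, x ≠ '1' := ⟨'0', h0, by decide⟩
    have hw0 : ∃ x ∈ l, x ≠ '0' := ⟨'1', h1, by decide⟩
    have hj1 : 1 ≤ cnt '1' l b := cnt_pos '1' l b hb hcb hw1
    have hjn : cnt '1' l b < l.length := cnt_lt '1' l b hb hw1
    have hsh := cnt_shift '1' l b hb hcb hw1
    have he1b : (b + 1) % l.length < l.length := Nat.mod_lt _ hn
    have hbk : ∀ k, k < cnt '1' l b - 1 → ((b + 1) % l.length + k) % l.length ≠ b := by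
      intro k hk
      rw [Nat.mod_add_mod, mod_small_cases (b + 1 + k) l.length (by omega)]
      split_ifs with h <;> omega
    have hE1 : scanCirc '1' l l.length b ((b + 1) % l.length) l.length
        = (b + cnt '1' l b) % l.length := by
      rw [scan_spec '1' l b (cnt '1' l b - 1) ((b + 1) % l.length) l.length he1b
        (by omega) (by omega) hw1 hbk, Nat.mod_add_mod]
      congr 1
      omega
    have hE1lt : (b + cnt '1' l b) % l.length < l.length := Nat.mod_lt _ hn
    have hchE1 : l.getD ((b + cnt '1' l b) % l.length) ' ' ≠ '1' :=
      charAt_after '1' l b hb hjn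
    have hchE1' : l.getD ((b + cnt '1' l b) % l.length) ' ' = '0' := by
      rw [getD_lt l _ hE1lt] at hchE1 ⊢
      rcases hbin _ (List.getElem_mem hE1lt) with h | h
      · exact h
      · exact absurd h hchE1
    have hcnt_eq := cnt_eq '1' l b hb
    have hjtle : tw '1' (l.drop b) ≤ l.length - b := by
      have := tw_le '1' (l.drop b)
      simpa using this
    by_cases hwr : tw '1' (l.drop b) = l.length - b
    · -- the run starting at b reaches the end of the string and wraps
      have hall : ∀ x ∈ l.drop b, x = '1' := by
        apply (tw_eq_len_iff '1' (l.drop b)).mp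
        rw [hwr]
        simp
      have hdropRep : l.drop b = List.replicate (l.length - b) '1' := by
        apply List.eq_replicate_iff.mpr
        exact ⟨by simp, hall⟩
      have h0take : '0' ∈ l.take b := by
        have hsplit : l.take b ++ l.drop b = l := List.take_append_drop b l
        rcases List.mem_append.mp (by rw [hsplit]; exact h0) with h | h
        · exact h
        · exact absurd (hall _ h) (by decide)
      have hbpos : 0 < b := by
        by_contra h
        have hb0 : b = 0 := by omega
        rw [hb0] at h0take
        simp at h0take
      have hw1lt : tw '1' (l.take b) < b := by
        have := tw_lt '1' (l.take b) ⟨'0', h0take, by decide⟩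
        simpa [Nat.min_eq_left (le_of_lt hb)] using this
      have hLw1 : tw '1' l = tw '1' (l.take b) := by
        have hlt : (List.takeWhile (· == '1') (l.take b)).length ≠ (l.take b).length := by
          have hlen : (l.take b).length = b := by
            simp [Nat.min_eq_left (le_of_lt hb)]
          rw [hlen]
          intro hc
          unfold tw at hw1lt
          omega
        conv_lhs => rw [← List.take_append_drop b l]
        unfold tw
        rw [List.takeWhile_append, if_neg hlt]
      have hjeq : cnt '1' l b = (l.length - b) + tw '1' (l.take b) := by
        rw [hcnt_eq, if_pos hwr]
      have hE1w : (b + cnt '1' l b) % l.length = tw '1' (l.take b) := by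
        rw [hjeq, show b + ((l.length - b) + tw '1' (l.take b))
          = l.length + tw '1' (l.take b) by omega, Nat.add_mod_left]
        exact Nat.mod_eq_of_lt (by omega)
      have hchw : l.getD (tw '1' (l.take b)) ' ' = '0' := by rw [← hE1w]; exact hchE1'
      have hwlt : tw '1' (l.take b) < l.length := by omega
      have hz1 : 1 ≤ cnt '0' l (tw '1' (l.take b)) := cnt_pos '0' l _ hwlt hchw hw0
      have hzn : cnt '0' l (tw '1' (l.take b)) < l.length := cnt_lt '0' l _ hwlt hw0
      have hbz : ∀ k, k < cnt '0' l (tw '1' (l.take b)) →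
          (tw '1' (l.take b) + k) % l.length ≠ b := by
        intro k hk heq
        have := charAt_run '0' l (tw '1' (l.take b)) k hwlt hk
        rw [heq] at this
        rw [hcb] at this
        exact absurd this (by decide)
      have hscan0 : scanCirc '0' l l.length b ((b + cnt '1' l b) % l.length) l.length
          = (tw '1' (l.take b) + cnt '0' l (tw '1' (l.take b))) % l.length := by
        rw [hE1w]
        exact scan_spec '0' l b _ _ l.length hwlt rfl (by omega) hw0 hbz
      have hwzb : tw '1' (l.take b) + cnt '0' l (tw '1' (l.take b)) ≤ b := by
        by_contra h
        have hk : b - tw '1' (l.take b) < cnt '0' l (tw '1' (l.take b)) := by omega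
        have := charAt_run '0' l (tw '1' (l.take b)) (b - tw '1' (l.take b)) hwlt hk
        rw [show tw '1' (l.take b) + (b - tw '1' (l.take b)) = b by omega,
          Nat.mod_eq_of_lt hb, hcb] at this
        exact absurd this (by decide)
      have hE2 : (tw '1' (l.take b) + cnt '0' l (tw '1' (l.take b))) % l.length
          = tw '1' (l.take b) + cnt '0' l (tw '1' (l.take b)) :=
        Nat.mod_eq_of_lt (by omega)
      have hGval : G (l.drop b) (tw '1' l) = (l.length - b) + tw '1' (l.take b) := by
        rw [hdropRep, hLw1, show l.length - b = (l.length - b - 1) + 1 by omega, G_ones]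
      rw [outerLoop]
      simp only [if_pos hb]
      rw [hE1, hscan0, hE2, if_pos hwzb, hE1w, if_neg (by omega)]
      rw [hGval]
      omega
    · -- the run starting at b ends at a '0' before the end of the string
      have hjeq : cnt '1' l b = tw '1' (l.drop b) := by rw [hcnt_eq, if_neg hwr]
      have hjtlt : tw '1' (l.drop b) < l.length - b := lt_of_le_of_ne hjtle hwr
      have hE1v : (b + cnt '1' l b) % l.length = b + tw '1' (l.drop b) := by
        rw [hjeq]
        exact Nat.mod_eq_of_lt (by omega)
      have hE1sm : b + tw '1' (l.drop b) < l.length := by omega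
      have hchE1'' : l.getD (b + tw '1' (l.drop b)) ' ' = '0' := by
        rw [← hE1v]; exact hchE1'
      have hz1 : 1 ≤ cnt '0' l (b + tw '1' (l.drop b)) :=
        cnt_pos '0' l _ hE1sm hchE1'' hw0
      have hzn : cnt '0' l (b + tw '1' (l.drop b)) < l.length := cnt_lt '0' l _ hE1sm hw0
      have hbz : ∀ k, k < cnt '0' l (b + tw '1' (l.drop b)) →
          (b + tw '1' (l.drop b) + k) % l.length ≠ b := by
        intro k hk heq
        have := charAt_run '0' l (b + tw '1' (l.drop b)) k hE1sm hk
        rw [heq, hcb] at this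
        exact absurd this (by decide)
      have hscan0 : scanCirc '0' l l.length b ((b + cnt '1' l b) % l.length) l.length
          = (b + tw '1' (l.drop b) + cnt '0' l (b + tw '1' (l.drop b))) % l.length := by
        rw [hE1v]
        exact scan_spec '0' l b _ _ l.length hE1sm rfl (by omega) hw0 hbz
      -- decomposition of drop b
      have htwdropb : (l.drop b).takeWhile (· == '1')
          = List.replicate (tw '1' (l.drop b)) '1' := takeWhile_eq_replicate '1' (l.drop b)
      have hsplitb : l.drop b
          = List.replicate (tw '1' (l.drop b)) '1' ++ (l.drop b).dropWhile (· == '1') := by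
        conv_lhs => rw [← List.takeWhile_append_dropWhile (p := (· == '1')) (l := l.drop b)]
        rw [htwdropb]
      have hdws : (l.drop b).dropWhile (· == '1') = l.drop (b + tw '1' (l.drop b)) := by
        have hdd : l.drop (b + tw '1' (l.drop b)) = (l.drop b).drop (tw '1' (l.drop b)) := by
          rw [List.drop_drop]
        have h3 := congrArg (List.drop (tw '1' (l.drop b))) hsplitb
        have h4 : (List.replicate (tw '1' (l.drop b)) '1'
            ++ (l.drop b).dropWhile (· == '1')).drop (tw '1' (l.drop b))
            = (l.drop b).dropWhile (· == '1') := by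
          have := List.drop_left (l₁ := List.replicate (tw '1' (l.drop b)) '1')
            (l₂ := (l.drop b).dropWhile (· == '1'))
          simpa using this
        rw [hdd, h3, h4]
      have hzeq := cnt_eq '0' l (b + tw '1' (l.drop b)) hE1sm
      by_cases hzwr : tw '0' (l.drop (b + tw '1' (l.drop b)))
          = l.length - (b + tw '1' (l.drop b))
      · -- trailing zeros reach the end of the string: the scan wraps to a
        -- position ≤ b and A breaks
        have hzv : cnt '0' l (b + tw '1' (l.drop b))
            = (l.length - (b + tw '1' (l.drop b)))
              + tw '0' (l.take (b + tw '1' (l.drop b))) := by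
          rw [hzeq, if_pos hzwr]
        have hw0b : tw '0' (l.take (b + tw '1' (l.drop b))) ≤ b := by
          by_contra h
          have hblt : b < tw '0' (l.take (b + tw '1' (l.drop b))) := by omega
          have hget := getElem_of_lt_tw '0' (l.take (b + tw '1' (l.drop b))) b hblt
          rw [List.getElem_take] at hget
          rw [getD_lt l b hb] at hcb
          rw [hcb] at hget
          exact absurd hget (by decide)
        have hE2 : (b + tw '1' (l.drop b) + cnt '0' l (b + tw '1' (l.drop b))) % l.length
            = tw '0' (l.take (b + tw '1' (l.drop b))) := by
          rw [hzv, show b + tw '1' (l.drop b) + ((l.length - (b + tw '1' (l.drop b)))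
            + tw '0' (l.take (b + tw '1' (l.drop b))))
            = l.length + tw '0' (l.take (b + tw '1' (l.drop b))) by omega,
            Nat.add_mod_left]
          exact Nat.mod_eq_of_lt (by omega)
        have hallz : ∀ x ∈ l.drop (b + tw '1' (l.drop b)), x = '0' := by
          apply (tw_eq_len_iff '0' _).mp
          rw [hzwr]
          simp
        have hdropz : l.drop (b + tw '1' (l.drop b))
            = List.replicate (l.length - (b + tw '1' (l.drop b))) '0' := by
          apply List.eq_replicate_iff.mpr
          exact ⟨by simp, hallz⟩
        have hGval : G (l.drop b) (tw '1' l) = max (tw '1' (l.drop b)) 0 := by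
          conv_lhs => rw [hsplitb, hdws, hdropz]
          rw [show l.length - (b + tw '1' (l.drop b))
            = (l.length - (b + tw '1' (l.drop b)) - 1) + 1 by omega, List.replicate_succ,
            G_run]
          congr 1
          rw [← List.append_nil
            (List.replicate (l.length - (b + tw '1' (l.drop b)) - 1) '0'), G_zeros]
          simp [G]
        rw [outerLoop]
        simp only [if_pos hb]
        rw [hE1v] at hE1
        rw [hE1v] at hscan0
        rw [hE1, hscan0, hE2, if_pos (by omega), if_pos (by omega), hGval]
        omega
      · -- next run of ones starts before the end: A advances and we recurse
        have hzv : cnt '0' l (b + tw '1' (l.drop b))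
            = tw '0' (l.drop (b + tw '1' (l.drop b))) := by
          rw [hzeq, if_neg hzwr]
        have hzle : tw '0' (l.drop (b + tw '1' (l.drop b)))
            ≤ l.length - (b + tw '1' (l.drop b)) := by
          have := tw_le '0' (l.drop (b + tw '1' (l.drop b)))
          simpa using this
        have hzlt : tw '0' (l.drop (b + tw '1' (l.drop b)))
            < l.length - (b + tw '1' (l.drop b)) := lt_of_le_of_ne hzle hzwr
        have hE2sm : b + tw '1' (l.drop b) + cnt '0' l (b + tw '1' (l.drop b))
            < l.length := by omega
        have hE2 : (b + tw '1' (l.drop b) + cnt '0' l (b + tw '1' (l.drop b))) % l.length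
            = b + tw '1' (l.drop b) + cnt '0' l (b + tw '1' (l.drop b)) :=
          Nat.mod_eq_of_lt hE2sm
        have hch2 : l.getD (b + tw '1' (l.drop b)
            + cnt '0' l (b + tw '1' (l.drop b))) ' ' ≠ '0' := by
          have := charAt_after '0' l (b + tw '1' (l.drop b)) hE1sm hzn
          rwa [hE2] at this
        have hch2' : l.getD (b + tw '1' (l.drop b)
            + cnt '0' l (b + tw '1' (l.drop b))) ' ' = '1' := by
          rw [getD_lt l _ hE2sm] at hch2 ⊢
          rcases hbin _ (List.getElem_mem hE2sm) with h | h
          · exact absurd h hch2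
          · exact h
        -- decomposition of the zero block
        have htwz : (l.drop (b + tw '1' (l.drop b))).takeWhile (· == '0')
            = List.replicate (tw '0' (l.drop (b + tw '1' (l.drop b)))) '0' :=
          takeWhile_eq_replicate '0' _
        have hsplitz : l.drop (b + tw '1' (l.drop b))
            = List.replicate (tw '0' (l.drop (b + tw '1' (l.drop b)))) '0'
              ++ (l.drop (b + tw '1' (l.drop b))).dropWhile (· == '0') := by
          conv_lhs => rw [← List.takeWhile_append_dropWhile (p := (· == '0'))
            (l := l.drop (b + tw '1' (l.drop b)))]
          rw [htwz]
        have hdwz : (l.drop (b + tw '1' (l.drop b))).dropWhile (· == '0')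
            = l.drop (b + tw '1' (l.drop b) + tw '0' (l.drop (b + tw '1' (l.drop b)))) := by
          have hdd : l.drop (b + tw '1' (l.drop b) + tw '0' (l.drop (b + tw '1' (l.drop b))))
              = (l.drop (b + tw '1' (l.drop b))).drop
                (tw '0' (l.drop (b + tw '1' (l.drop b)))) := by
            rw [List.drop_drop]
          have h3 := congrArg (List.drop (tw '0' (l.drop (b + tw '1' (l.drop b))))) hsplitz
          have h4 : (List.replicate (tw '0' (l.drop (b + tw '1' (l.drop b)))) '0'
              ++ (l.drop (b + tw '1' (l.drop b))).dropWhile (· == '0')).drop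
                (tw '0' (l.drop (b + tw '1' (l.drop b))))
              = (l.drop (b + tw '1' (l.drop b))).dropWhile (· == '0') := by
            have := List.drop_left
              (l₁ := List.replicate (tw '0' (l.drop (b + tw '1' (l.drop b)))) '0')
              (l₂ := (l.drop (b + tw '1' (l.drop b))).dropWhile (· == '0'))
            simpa using this
          rw [hdd, h3, h4]
        have hGval : G (l.drop b) (tw '1' l)
            = max (tw '1' (l.drop b))
              (G (l.drop (b + tw '1' (l.drop b)
                + tw '0' (l.drop (b + tw '1' (l.drop b))))) (tw '1' l)) := by
          conv_lhs => rw [hsplitb, hdws, hsplitz, hdwz]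
          rw [show tw '0' (l.drop (b + tw '1' (l.drop b)))
            = (tw '0' (l.drop (b + tw '1' (l.drop b))) - 1) + 1 by omega,
            List.replicate_succ, List.cons_append, G_run]
          congr 1
          rw [G_zeros]
        have hrec := ih (b + tw '1' (l.drop b) + cnt '0' l (b + tw '1' (l.drop b)))
          (max (tw '1' (l.drop b)) m) hE2sm hch2' (by omega)
        rw [outerLoop]
        simp only [if_pos hb]
        rw [hE1v] at hE1
        rw [hE1v] at hscan0
        rw [hE1, hscan0, hE2, if_neg (by omega), if_pos (by omega),
          show b + tw '1' (l.drop b) - b = tw '1' (l.drop b) by omega]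
        rw [hrec, hzv, hGval]
        omega

theorem fold_ones (k : Nat) : ∀ (B c : Nat), c ≤ B →
    List.foldl foldStep (B, c) (List.replicate k '1') = (max B (c + k), c + k) := by
  induction k with
  | zero =>
    intro B c hc
    simp [Nat.max_eq_left hc]
  | succ k ih =>
    intro B c hc
    rw [List.replicate_succ, List.foldl_cons]
    have hstep : foldStep (B, c) '1' = (max B (c + 1), c + 1) := by simp [foldStep]
    rw [hstep, ih (max B (c + 1)) (c + 1) (le_max_right _ _)]
    have h1 : max (max B (c + 1)) (c + 1 + k) = max B (c + (k + 1)) := by omega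
    have h2 : c + 1 + k = c + (k + 1) := by omega
    rw [h1, h2]

theorem fold_spec_aux : ∀ (N : Nat) (t : List Char), t.length ≤ N →
    (∀ x ∈ t, x = '0' ∨ x = '1') →
    ∀ (L B : Nat), (L ≤ B ∨ L ≤ tw '1' t) →
    max (t.foldl foldStep (B, 0)).1 (L + (t.foldl foldStep (B, 0)).2) = max B (G t L) := by
  intro N
  induction N with
  | zero =>
    intro t ht _ L B hLB
    have hnil : t = [] := List.eq_nil_of_length_eq_zero (by omega)
    subst hnil
    simp [G, tw] at hLB ⊢
    omega
  | succ N ih =>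
    intro t ht hbin L B hLB
    cases t with
    | nil =>
      simp [G, tw] at hLB ⊢
      omega
    | cons c t' =>
      rcases hbin c (List.mem_cons_self ..) with hc | hc
      · subst hc
        have hstep : foldStep (B, 0) '0' = (B, 0) := by simp [foldStep]
        rw [List.foldl_cons, hstep]
        have hG : G ('0' :: t') L = G t' L := by simp [G]
        rw [hG]
        apply ih t' (by simp at ht; omega)
          (fun x hx => hbin x (List.mem_cons_of_mem _ hx)) L B
        left
        rcases hLB with h | h
        · exact h
        · have h0 : tw '1' ('0' :: t') = 0 := by simp [tw, List.takeWhile_cons]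
          omega
      · subst hc
        have htwt : tw '1' ('1' :: t') = tw '1' t' + 1 := by
          simp [tw, List.takeWhile_cons]
        by_cases hterm : tw '1' t' = t'.length
        · have hall : ∀ x ∈ t', x = '1' := (tw_eq_len_iff '1' t').mp hterm
          have hrep : t' = List.replicate t'.length '1' :=
            List.eq_replicate_iff.mpr ⟨rfl, hall⟩
          have hfold : List.foldl foldStep (B, 0) ('1' :: t')
              = (max B (t'.length + 1), t'.length + 1) := by
            conv_lhs => rw [show ('1' :: t' : List Char)
              = List.replicate (t'.length + 1) '1' by
                rw [List.replicate_succ, ← hrep]]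
            have := fold_ones (t'.length + 1) B 0 (by omega)
            simpa using this
          rw [hfold]
          have hG : G ('1' :: t') L = 1 + t'.length + L := by
            rw [G, if_neg (by decide), if_pos hterm]
          rw [hG]
          simp
          omega
        · have hj'lt : tw '1' t' < t'.length := lt_of_le_of_ne (tw_le _ _) hterm
          have hsplit : t'.takeWhile (· == '1') ++ t'.dropWhile (· == '1') = t' :=
            List.takeWhile_append_dropWhile
          have hlensum : tw '1' t' + (t'.dropWhile (· == '1')).length = t'.length := by
            have h := congrArg List.length hsplit
            rw [List.length_append] at h
            exact h
          have hdw_ne : t'.dropWhile (· == '1') ≠ [] := by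
            intro h
            rw [h] at hlensum
            simp at hlensum
            omega
          obtain ⟨a, r, har⟩ : ∃ a r, t'.dropWhile (· == '1') = a :: r := by
            cases h : t'.dropWhile (· == '1') with
            | nil => exact absurd h hdw_ne
            | cons a r => exact ⟨_, _, rfl⟩
          have ha0 : a = '0' := by
            have hne1 : ¬ (a == '1') = true := by
              have h2 := List.head_dropWhile_not (· == '1') hdw_ne
              have h3 : (t'.dropWhile (· == '1')).head hdw_ne = a := by simp [har]
              rw [h3] at h2
              simp [h2]
            have hamem : a ∈ t' := (List.dropWhile_sublist _).subset
              (by rw [har]; exact List.mem_cons_self ..)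
            rcases hbin a (List.mem_cons_of_mem _ hamem) with h | h
            · exact h
            · simp [h] at hne1
          have ht' : t' = List.replicate (tw '1' t') '1' ++ '0' :: r := by
            conv_lhs => rw [← hsplit]
            rw [takeWhile_eq_replicate, har, ha0]
          have hrepl : ('1' :: t' : List Char)
              = List.replicate (tw '1' t' + 1) '1' ++ '0' :: r := by
            rw [List.replicate_succ, List.cons_append, ← ht']
          have hfold : List.foldl foldStep (B, 0) ('1' :: t')
              = List.foldl foldStep (max B (tw '1' t' + 1), 0) r := by
            rw [hrepl, List.foldl_append, fold_ones (tw '1' t' + 1) B 0 (by omega),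
              List.foldl_cons]
            have hst : foldStep (max B (0 + (tw '1' t' + 1)), 0 + (tw '1' t' + 1)) '0'
                = (max B (tw '1' t' + 1), 0) := by
              simp [foldStep]
            rw [hst]
          have hG : G ('1' :: t') L = max (tw '1' t' + 1) (G r L) := by
            rw [hrepl, G_run]
          have hrlen : r.length ≤ N := by
            have := congrArg List.length ht'
            simp at this ht
            omega
          have hrbin : ∀ x ∈ r, x = '0' ∨ x = '1' := by
            intro x hx
            apply hbin
            apply List.mem_cons_of_mem
            rw [ht']
            exact List.mem_append_right _ (List.mem_cons_of_mem _ hx)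
          have hrec := ih r hrlen hrbin L (max B (tw '1' t' + 1)) (by
            rcases hLB with h | h
            · left; omega
            · rw [htwt] at h; left; omega)
          rw [hfold, hG, hrec]
          omega

theorem fold_spec : ∀ (t : List Char), (∀ x ∈ t, x = '0' ∨ x = '1') →
    ∀ (L B : Nat), (L ≤ B ∨ L ≤ tw '1' t) →
    max (t.foldl foldStep (B, 0)).1 (L + (t.foldl foldStep (B, 0)).2) = max B (G t L) :=
  fun t => fold_spec_aux t.length t le_rfl

theorem leadOnes_eq (l : List Char) : leadOnes l = tw '1' l := by
  induction l with
  | nil => rfl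
  | cons c t ih =>
    by_cases h : c = '1' <;> simp [leadOnes, tw, h] at ih ⊢ <;> omega

theorem singleton_infix_iff (c : Char) (l : List Char) : [c] <:+: l ↔ c ∈ l := by
  constructor
  · intro h
    exact h.subset (by simp)
  · intro h
    obtain ⟨u, v, huv⟩ := List.append_of_mem h
    exact ⟨u, v, by rw [huv]; simp⟩

theorem scan_stop (tc : Char) (l : List Char) (n b e fuel : Nat)
    (h : l.getD e ' ' ≠ tc) : scanCirc tc l n b e fuel = e := by
  cases fuel with
  | zero => rfl
  | succ f => rw [scanCirc, if_neg (by rintro ⟨h1, _⟩; exact h h1)]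

theorem outer_allones (l : List Char) (hall : ∀ x ∈ l, x = '1') (h2 : 2 ≤ l.length) :
    ∀ fuel, 1 ≤ fuel → outerLoop l l.length 0 0 fuel = l.length := by
  intro fuel hf
  obtain ⟨f, rfl⟩ : ∃ f', fuel = f' + 1 := ⟨fuel - 1, by omega⟩
  rw [outerLoop]
  simp only [if_pos (show 0 < l.length by omega)]
  rw [show (0 + 1) % l.length = 1 from Nat.mod_eq_of_lt (by omega)]
  rw [scan_allones l hall l.length 1 (by omega) (Or.inr (by omega))]
  rw [scan_stop '0' l l.length 0 0 l.length (by
    rw [getD_lt l 0 (by omega), hall _ (List.getElem_mem (show 0 < l.length by omega))]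
    decide)]
  simp

theorem M_bound (l : List Char) (hbin : ∀ c ∈ l, c = '0' ∨ c = '1')
    (h1 : '1' ∈ l) (h0 : '0' ∈ l) (b0 : Nat) (hb0 : b0 < l.length)
    (hzero : ∀ i, i < b0 → l.getD i ' ' = '0') :
    G (l.drop b0) (tw '1' l) + 1 ≤ l.length := by
  by_cases hb00 : b0 = 0
  · subst hb00
    have hsplit0 : l = List.replicate (tw '1' l) '1' ++ l.dropWhile (· == '1') := by
      conv_lhs => rw [← List.takeWhile_append_dropWhile (p := (· == '1')) (l := l)]
      rw [takeWhile_eq_replicate]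
    have hne : l.dropWhile (· == '1') ≠ [] := by
      intro h
      rw [h, List.append_nil] at hsplit0
      have := List.eq_of_mem_replicate (by rw [← hsplit0]; exact h0)
      exact absurd this (by decide)
    obtain ⟨a, r, har⟩ : ∃ a r, l.dropWhile (· == '1') = a :: r := by
      cases h : l.dropWhile (· == '1') with
      | nil => exact absurd h hne
      | cons a r => exact ⟨_, _, rfl⟩
    have ha0 : a = '0' := by
      have h2 := List.head_dropWhile_not (· == '1') hne
      have h3 : (l.dropWhile (· == '1')).head hne = a := by simp [har]
      rw [h3] at h2
      have hamem : a ∈ l := (List.dropWhile_sublist _).subset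
        (by rw [har]; exact List.mem_cons_self ..)
      rcases hbin a hamem with h | h
      · exact h
      · rw [h] at h2; simp at h2
    have hlen : l.length = tw '1' l + 1 + r.length := by
      have := congrArg List.length hsplit0
      rw [har, ha0] at this
      simp at this
      omega
    have hGv : G (l.drop 0) (tw '1' l) = max (tw '1' l) (G r (tw '1' l)) := by
      rw [List.drop_zero]
      have hrw : l = List.replicate (tw '1' l) '1' ++ '0' :: r := by
        conv_lhs => rw [hsplit0]
        rw [har, ha0]
      have hcast := congrArg (fun t => G t (tw '1' l)) hrw
      simp only at hcast
      rw [hcast, G_run]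
    have hGle := G_le r (tw '1' l)
    rw [hGv]
    omega
  · have hLw : tw '1' l = 0 := by
      cases hl : l with
      | nil => rw [hl] at h1; simp at h1
      | cons c rest =>
        have hc : c = '0' := by
          have := hzero 0 (by omega)
          rw [hl] at this
          simpa [List.getD] using this
        rw [hc]
        simp [tw, List.takeWhile_cons]
    have := G_le (l.drop b0) (tw '1' l)
    rw [hLw] at this ⊢
    simp at this
    omega

theorem area_eq (M : Nat) :
    (if ¬ PySem.Int.mod (M : Int) 2 = 0 then
       PySem.Int.floordiv ((M : Int) + 1) 2
         * ((M : Int) - PySem.Int.floordiv ((M : Int) + 1) 2 + 1)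
     else
       max (PySem.Int.floordiv (M : Int) 2
              * ((M : Int) - PySem.Int.floordiv (M : Int) 2 + 1))
           (PySem.Int.floordiv ((M : Int) + 2) 2
              * ((M : Int) - PySem.Int.floordiv ((M : Int) + 2) 2 + 1)))
    = PySem.Int.floordiv ((M : Int) + 1) 2
        * ((M : Int) - PySem.Int.floordiv ((M : Int) + 1) 2 + 1) := by
  have hmod : PySem.Int.mod (M : Int) 2 = ((M % 2 : Nat) : Int) := by
    exact_mod_cast PySem.Int.mod_natCast M 2
  have hd0 : PySem.Int.floordiv (M : Int) 2 = ((M / 2 : Nat) : Int) := by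
    exact_mod_cast PySem.Int.floordiv_natCast M 2
  have hd1 : PySem.Int.floordiv ((M : Int) + 1) 2 = (((M + 1) / 2 : Nat) : Int) := by
    have h := PySem.Int.floordiv_natCast (M + 1) 2
    push_cast at h
    exact_mod_cast h
  have hd2 : PySem.Int.floordiv ((M : Int) + 2) 2 = (((M + 2) / 2 : Nat) : Int) := by
    have h := PySem.Int.floordiv_natCast (M + 2) 2
    push_cast at h
    exact_mod_cast h
  rcases Nat.even_or_odd M with ⟨k, hk⟩ | ⟨k, hk⟩
  · subst hk
    rw [hmod, hd0, hd1, hd2,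
      show (k + k) % 2 = 0 by omega, show (k + k) / 2 = k by omega,
      show (k + k + 1) / 2 = k by omega, show (k + k + 2) / 2 = k + 1 by omega,
      if_neg (by simp)]
    push_cast
    have h2 : ((k : Int) + 1) * ((k : Int) + (k : Int) - ((k : Int) + 1) + 1)
        = (k : Int) * ((k : Int) + (k : Int) - (k : Int) + 1) := by ring
    rw [h2, max_self]
  · subst hk
    rw [if_pos (by rw [hmod]; omega)]

-- ===== VERDICT (by name: the statement is the Claim_ definition above) =====
theorem solve_spec : Claim_equal_solve := by
  intro s _ hpre
  unfold Spec_solve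
  have h1list : ("1" : String).toList = ['1'] := rfl
  have h0list : ("0" : String).toList = ['0'] := rfl
  simp only [solve, solve_alt, PySem.Str.find_eq, PySem.Str.isIn_eq, PySem.Str.len_eq,
    h1list, h0list, ne_eq]
  by_cases h1 : '1' ∈ s.toList
  · have hbin : ∀ c ∈ s.toList, c = '0' ∨ c = '1' := by
      have hall : s.toList.all (fun c => c == '0' || c == '1') = true := by
        rcases Bool.or_eq_true_iff.mp hpre with h | h
        · exact h
        · exfalso
          have : s.toList.contains '1' = true := by simpa using h1
          rw [this] at h
          simp at h
      intro c hc
      have := List.all_eq_true.mp hall c hc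
      rcases Bool.or_eq_true_iff.mp this with h | h
      · exact Or.inl (by simpa using h)
      · exact Or.inr (by simpa using h)
    have hinf1 : ['1'] <:+: s.toList := (singleton_infix_iff _ _).mpr h1
    have hfind_nonneg : 0 ≤ PySem.Chars.find s.toList ['1'] :=
      (PySem.Chars.find_nonneg_iff _ _).mpr hinf1
    have hisin1 : PySem.Chars.isIn ['1'] s.toList = true :=
      (PySem.Chars.isIn_iff_infix _ _).mpr hinf1
    rw [if_neg (show ¬ PySem.Chars.find s.toList ['1'] = -1 by omega)]
    have hspec := PySem.Chars.find_spec hfind_nonneg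
    obtain ⟨u, hu⟩ := hspec.1
    have hb0le : (PySem.Chars.find s.toList ['1']).toNat ≤ s.toList.length := by
      have := PySem.Chars.find_le_length s.toList ['1']
      omega
    have hb0lt : (PySem.Chars.find s.toList ['1']).toNat < s.toList.length := by
      have hlen := congrArg List.length hu
      rw [List.length_append, List.length_drop,
        show (['1'] : List Char).length = 1 from rfl] at hlen
      omega
    have hcons : s.toList.drop (PySem.Chars.find s.toList ['1']).toNat = '1' :: u := by
      rw [← hu]; rfl
    have hchb0 : s.toList.getD (PySem.Chars.find s.toList ['1']).toNat ' ' = '1' := by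
      rw [List.getD_eq_getElem?_getD, ← List.head?_drop, hcons]
      rfl
    have hzeros : ∀ i, i < (PySem.Chars.find s.toList ['1']).toNat →
        s.toList.getD i ' ' = '0' := by
      intro i hi
      have hilt : i < s.toList.length := by omega
      rcases hbin _ (List.getElem_mem hilt) with h | h
      · rw [getD_lt _ _ hilt]; exact h
      · exfalso
        apply hspec.2 i hi
        refine ⟨s.toList.drop (i + 1), ?_⟩
        rw [List.drop_eq_getElem_cons hilt, h]
        rfl
    by_cases h0 : '0' ∈ s.toList
    · -- main case: both characters occur
      have hinf0 : ['0'] <:+: s.toList := (singleton_infix_iff _ _).mpr h0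
      have hisin0 : PySem.Chars.isIn ['0'] s.toList = true :=
        (PySem.Chars.isIn_iff_infix _ _).mpr hinf0
      have hn2 : 2 ≤ s.toList.length := by
        by_contra h
        rcases Nat.lt_or_ge s.toList.length 1 with hl | hl
        · have : s.toList = [] :=
            List.eq_nil_of_length_eq_zero (show s.toList.length = 0 by omega)
          rw [this] at h1; simp at h1
        · obtain ⟨a, ha⟩ := List.length_eq_one_iff.mp (show s.toList.length = 1 by omega)
          rw [ha] at h1 h0
          simp at h1 h0
          exact absurd (h1.trans h0.symm) (by decide)
      rw [if_neg (show ¬ ((s.toList.length : Int)) = 1 by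
        intro hc
        have : s.toList.length = 1 := by exact_mod_cast hc
        omega)]
      have houter := outer_spec s.toList hbin h1 h0 s.toList.length
        (PySem.Chars.find s.toList ['1']).toNat 0 hb0lt hchb0 (by omega)
      have hMb := M_bound s.toList hbin h1 h0 (PySem.Chars.find s.toList ['1']).toNat
        hb0lt hzeros
      rw [houter, Nat.zero_max]
      rw [if_neg (show ¬ ((G (s.toList.drop (PySem.Chars.find s.toList ['1']).toNat)
          (tw '1' s.toList) : Nat) : Int) = (s.toList.length : Int) by
        intro hc
        have : G (s.toList.drop (PySem.Chars.find s.toList ['1']).toNat)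
            (tw '1' s.toList) = s.toList.length := by exact_mod_cast hc
        omega)]
      rw [if_neg (show ¬ PySem.Chars.isIn ['1'] s.toList = false by rw [hisin1]; simp),
        if_neg (show ¬ PySem.Chars.isIn ['0'] s.toList = false by rw [hisin0]; simp)]
      have hfold := fold_spec s.toList hbin (tw '1' s.toList) 0 (Or.inr le_rfl)
      have hGdrop := G_drop_zeros (tw '1' s.toList)
        (PySem.Chars.find s.toList ['1']).toNat s.toList hb0le hzeros
      rw [leadOnes_eq, hfold, Nat.zero_max, hGdrop]
      exact area_eq _
    · -- all characters are '1'
      have hall : ∀ x ∈ s.toList, x = '1' := by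
        intro x hx
        rcases hbin x hx with h | h
        · rw [h] at hx; exact absurd hx h0
        · exact h
      have hisin0 : PySem.Chars.isIn ['0'] s.toList = false :=
        (PySem.Chars.isIn_eq_false_iff _ _).mpr (by
          intro hc
          exact h0 (hc.subset (by simp)))
      by_cases hlen1 : s.toList.length = 1
      · rw [if_pos (show ((s.toList.length : Int)) = 1 by exact_mod_cast hlen1)]
        rw [if_neg (show ¬ PySem.Chars.isIn ['1'] s.toList = false by rw [hisin1]; simp),
          if_pos hisin0, hlen1]
        decide
      · have hn2 : 2 ≤ s.toList.length := by
          by_contra h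
          have h00 : s.toList.length = 0 := by omega
          have : s.toList = [] := List.eq_nil_of_length_eq_zero h00
          rw [this] at h1; simp at h1
        rw [if_neg (show ¬ ((s.toList.length : Int)) = 1 by
          intro hc
          exact hlen1 (by exact_mod_cast hc))]
        have hb00 : (PySem.Chars.find s.toList ['1']).toNat = 0 := by
          by_contra hb
          apply hspec.2 0 (by omega)
          refine ⟨s.toList.drop 1, ?_⟩
          rw [List.drop_eq_getElem_cons (show 0 < s.toList.length by omega)]
          rw [hall _ (List.getElem_mem (show 0 < s.toList.length by omega))]
          rfl
        rw [hb00, outer_allones s.toList hall hn2 s.toList.length (by omega), if_pos rfl]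
        rw [if_neg (show ¬ PySem.Chars.isIn ['1'] s.toList = false by rw [hisin1]; simp),
          if_pos hisin0]
  · -- no '1' in the string: both return 0
    have hninf : ¬ ['1'] <:+: s.toList := by
      intro hc
      exact h1 (hc.subset (by simp))
    have hfind : PySem.Chars.find s.toList ['1'] = -1 :=
      (PySem.Chars.find_eq_neg_one_iff _ _).mpr hninf
    have hisin : PySem.Chars.isIn ['1'] s.toList = false :=
      (PySem.Chars.isIn_eq_false_iff _ _).mpr hninf
    rw [if_pos hfind, if_pos hisin]
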